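-- pv_equiv track=rewrite | github.com/alexander-zou/useful-scripts | math/draw_scatter.py | parse_filter_line
-- ===== SOURCE A (Python) =====
-- DIR_VERTICAL = 0
--
-- DIR_HORIZONTAL = 1
--
-- def parse_sheet_index( s):
--     s = s.strip()
--     if s == '':
--         return -1
--     try:
--         return int( s) - 1
--     except:
--         pass
--     result = 0
--     for ch in s.upper():
--         v = ord( ch) - ord( 'A') + 1
--         if v < 1 or v > 26:
--             raise Exception( "Not valid index '" + s + "'!")
--         result = result * 26 + v
--     return result - 1
--
-- def parse_filter_line( line, sheet, direction, idx):
--     result = ''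
--     while True:
--         start = line.find( '${')
--         if start < 0:
--             result += line
--             return result
--         length = line[ start+2:].find( '}')
--         if length < 0:
--             raise Exception( "brace('{}') NOT match!")
--         parsed_idx = parse_sheet_index( line[ start+2:start+2+length])
--         if direction == DIR_HORIZONTAL:
--             row, col = parsed_idx, idx
--         elif direction == DIR_VERTICAL:
--             row, col = idx, parsed_idx
--         else:
--             raise Exception( "Internal Exception 78D2!")
--         if row < len( sheet) and col < len( sheet[ row]):
--             value = "'" + sheet[ row][ col] + "'"
--         else:
--             value = "''"
--         result += line[ :start]
--         result += value
--         line = line[ start+3+length:]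
-- ===== SOURCE B (Python) =====
-- DIR_VERTICAL = 0
--
-- DIR_HORIZONTAL = 1
--
-- def _sheet_index(s):
--     s = s.strip()
--     if not s:
--         return -1
--     try:
--         return int(s) - 1
--     except ValueError:
--         pass
--     digits = [ord(c.upper()) - 64 for c in s]
--     if any(d < 1 or d > 26 for d in digits):
--         raise Exception("Not valid index '" + s + "'!")
--     total, mult = 0, 1
--     for d in reversed(digits):
--         total += d * mult
--         mult *= 26
--     return total - 1
--
-- def parse_filter_line(line, sheet, direction, idx):
--     parts = line.split('${')
--     out = [parts[0]]
--     for part in parts[1:]: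
--         i = part.find('}')
--         if i < 0:
--             raise Exception("brace('{}') NOT match!")
--         p = _sheet_index(part[:i])
--         if direction == DIR_HORIZONTAL:
--             row, col = p, idx
--         elif direction == DIR_VERTICAL:
--             row, col = idx, p
--         else:
--             raise Exception("Internal Exception 78D2!")
--         cell = sheet[row][col] if row < len(sheet) and col < len(sheet[row]) else ''
--         out.append("'" + cell + "'")
--         out.append(part[i + 1:])
--     return ''.join(out)
-- ===== Notes on version B (the rewrite author's own statement) =====
-- stated objective: idiomatic
-- what changed: B replaces A's while-loop that repeatedly re-scans and rebuilds the remaining string (find '${', slice, reassign line) by a single line.split('${') followed by one pass over the parts, and replaces A's Horner-style letter-index loop by a right-to-left weighted sum with an explicit multiplier.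
import Mathlib
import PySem

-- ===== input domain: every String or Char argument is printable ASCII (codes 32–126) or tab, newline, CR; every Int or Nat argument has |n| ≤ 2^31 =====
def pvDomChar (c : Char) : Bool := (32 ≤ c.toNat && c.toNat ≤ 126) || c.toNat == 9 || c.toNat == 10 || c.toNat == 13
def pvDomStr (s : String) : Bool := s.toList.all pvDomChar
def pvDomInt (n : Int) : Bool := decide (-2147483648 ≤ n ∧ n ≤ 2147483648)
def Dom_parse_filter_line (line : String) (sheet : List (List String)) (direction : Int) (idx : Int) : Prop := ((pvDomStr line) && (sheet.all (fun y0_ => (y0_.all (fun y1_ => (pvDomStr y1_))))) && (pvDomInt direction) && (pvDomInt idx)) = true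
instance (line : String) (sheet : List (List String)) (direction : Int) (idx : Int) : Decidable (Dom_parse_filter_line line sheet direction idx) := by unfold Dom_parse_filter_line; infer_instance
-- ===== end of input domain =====

-- B replaces A's repeated find/slice/rebuild while-loop by a single split on '${' plus one
-- pass over the parts, and A's Horner-style letter loop by a right-to-left weighted sum;
-- objective: idiomatic. Equivalence of return values is proved on Pre_ (inputs where A returns).

-- ===== PORT A =====

-- parse_sheet_index, letter loop: result = result * 26 + v, None = the raised exception
def pflA_psiLoop : List Char → Int → Option Int
  | [], result => some result
  | ch :: t, result =>
    let v : Int := (ch.toNat : Int) - ('A'.toNat : Int) + 1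
    if v < 1 ∨ v > 26 then none else pflA_psiLoop t (result * 26 + v)

-- parse_sheet_index (none = the raised exception)
def pflA_parse_sheet_index (s0 : List Char) : Option Int :=
  let s := PySem.Chars.strip s0
  if s = [] then some (-1)
  else
    match PySem.Int.ofChars? s with
    | some n => some (n - 1)
    | none =>
      match pflA_psiLoop (PySem.Chars.upper s) 0 with
      | some result => some (result - 1)
      | none => none

-- the 'if row < len(sheet) and col < len(sheet[row]) … value …' block, short-circuit kept;
-- none = IndexError from a too-negative index
def pflA_lookup (sheet : List (List String)) (row col : Int) : Option (List Char) :=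
  if row < (sheet.length : Int) then
    match PySem.List.pyGet? sheet row with
    | none => none
    | some r =>
      if col < (r.length : Int) then
        match PySem.List.pyGet? r col with
        | none => none
        | some cell => some ('\'' :: cell.toList ++ ['\''])
      else some ['\'', '\'']
  else some ['\'', '\'']

-- the while-loop of parse_filter_line (line, result): none = any raise
def pflA_loop (sheet : List (List String)) (direction idx : Int) (line result : List Char) :
    Option (List Char) :=
  let start := PySem.Chars.find line ['$', '{']
  if h1 : start < 0 then some (result ++ line)
  else
    let length := PySem.Chars.find (PySem.List.slice line (some (start + 2)) none) ['}']
    if h2 : length < 0 then none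
    else
      match pflA_parse_sheet_index (PySem.List.slice line (some (start + 2)) (some (start + 2 + length))) with
      | none => none
      | some parsed_idx =>
        match (if direction = 1 then some (parsed_idx, idx)
               else if direction = 0 then some (idx, parsed_idx) else none) with
        | none => none
        | some rc =>
          match pflA_lookup sheet rc.1 rc.2 with
          | none => none
          | some value =>
            pflA_loop sheet direction idx
              (PySem.List.slice line (some (start + 3 + length)) none)
              (result ++ PySem.List.slice line none (some start) ++ value)
termination_by line.length
decreasing_by
  have hin : (['$', '{'] : List Char) <:+: line :=
    (PySem.Chars.find_ne_neg_one_iff line ['$', '{']).1 (by omega)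
  have hll := hin.length_le
  simp only [List.length_cons, List.length_nil] at hll
  rw [PySem.List.slice_from _ (by omega : (0:Int) ≤ start + 3 + length)]
  simp only [List.length_drop]
  omega

def parse_filter_line (line : String) (sheet : List (List String)) (direction : Int) (idx : Int) : String :=
  String.ofList ((pflA_loop sheet direction idx line.toList []).getD [])

-- ===== PORT B =====

-- _sheet_index of Source B (none = the raised exception)
def pflB_index (s0 : List Char) : Option Int :=
  let s := PySem.Chars.strip s0
  if s = [] then some (-1)
  else
    match PySem.Int.ofChars? s with
    | some n => some (n - 1)
    | none =>
      let digits : List Int := s.map (fun c => ((PySem.Chars.upperChar c).toNat : Int) - 64)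
      if digits.any (fun d => d < 1 ∨ 26 < d) then none
      else
        some ((digits.reverse.foldl (fun tm d => (tm.1 + d * tm.2, tm.2 * 26)) ((0 : Int), (1 : Int))).1 - 1)

-- 'sheet[row][col] if row < len(sheet) and col < len(sheet[row]) else ""' (none = IndexError)
def pflB_cell (sheet : List (List String)) (row col : Int) : Option (List Char) :=
  if row < (sheet.length : Int) then
    match PySem.List.pyGet? sheet row with
    | none => none
    | some r =>
      if col < (r.length : Int) then (PySem.List.pyGet? r col).map String.toList
      else some []
  else some []

-- the body of Source B's for-loop: one part (text after a '${'), its produced piece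
def pflB_part (sheet : List (List String)) (direction idx : Int) (part : List Char) :
    Option (List Char) :=
  let i := PySem.Chars.find part ['}']
  if i < 0 then none
  else
    match pflB_index (PySem.List.slice part none (some i)) with
    | none => none
    | some p =>
      match (if direction = 1 then some (p, idx)
             else if direction = 0 then some (idx, p) else none) with
      | none => none
      | some rc =>
        match pflB_cell sheet rc.1 rc.2 with
        | none => none
        | some cell =>
          some (('\'' :: cell ++ ['\'']) ++ PySem.List.slice part (some (i + 1)) none)

-- one iteration of Source B's for-loop: out so far, next part
def pflB_fold (sheet : List (List String)) (direction idx : Int)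
    (acc : Option (List Char)) (part : List Char) : Option (List Char) :=
  match acc with
  | none => none
  | some a =>
    match pflB_part sheet direction idx part with
    | none => none
    | some piece => some (a ++ piece)

-- parts = line.split('${'); out = [parts[0]]; fold the loop over parts[1:]
def pflB_core (sheet : List (List String)) (direction idx : Int) (line : List Char) :
    Option (List Char) :=
  match PySem.Chars.splitOn line ['$', '{'] with
  | [] => some []
  | p0 :: parts => parts.foldl (pflB_fold sheet direction idx) (some p0)

def parse_filter_line_alt (line : String) (sheet : List (List String)) (direction : Int) (idx : Int) : String :=
  String.ofList ((pflB_core sheet direction idx line.toList).getD [])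

-- ===== PRECONDITION & SPEC =====

-- Pre-side helpers (independent of both ports): the numeric value of one '${…}' index string
def pvIdxVal? (s0 : List Char) : Option Int :=
  let s := PySem.Chars.strip s0
  if s = [] then some (-1)
  else
    match PySem.Int.ofChars? s with
    | some n => some (n - 1)
    | none =>
      if s.all (fun c => decide (65 ≤ (PySem.Chars.upperChar c).toNat) &&
                         decide ((PySem.Chars.upperChar c).toNat ≤ 90)) then
        some ((PySem.Chars.upper s).foldl (fun acc ch => acc * 26 + ((ch.toNat : Int) - 64)) 0 - 1)
      else none

def pvRC (direction idx p : Int) : Option (Int × Int) :=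
  if direction = 1 then some (p, idx) else if direction = 0 then some (idx, p) else none

-- the cell lookup raises no IndexError (negative wraparound indices must be in range)
def pvCellOK (sheet : List (List String)) (row col : Int) : Bool :=
  if row < (sheet.length : Int) then
    match PySem.List.pyGet? sheet row with
    | none => false
    | some r => if col < (r.length : Int) then (PySem.List.pyGet? r col).isSome else true
  else true

-- one template's content is a valid sheet index, the direction is known, the lookup is safe
def pvTemplOK (sheet : List (List String)) (direction idx : Int) (content : List Char) : Bool :=
  match pvIdxVal? content with
  | none => false
  | some p =>
    match pvRC direction idx p with
    | none => false
    | some rc => pvCellOK sheet rc.1 rc.2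

-- state machine over the line: outside (none) / inside a '${…' template (some content-so-far);
-- true exactly when every '${' is closed by a later '}' and every template resolves without a raise
def pvScan (sheet : List (List String)) (direction idx : Int) :
    List Char → Option (List Char) → Bool
  | [], m => m.isNone
  | '$' :: '{' :: rest, none => pvScan sheet direction idx rest (some [])
  | _ :: rest, none => pvScan sheet direction idx rest none
  | '}' :: rest, some acc => pvTemplOK sheet direction idx acc && pvScan sheet direction idx rest none
  | c :: rest, some acc =>
    decide (c ≠ '$') && decide (c ≠ '{') && pvScan sheet direction idx rest (some (acc ++ [c]))

-- Pre_: exactly the inputs on which A returns normally (on all others A raises: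
-- unmatched '${', an invalid index string, an unknown direction, or an IndexError)
def Pre_parse_filter_line (line : String) (sheet : List (List String)) (direction : Int) (idx : Int) : Prop :=
  pvScan sheet direction idx line.toList none = true
instance (line : String) (sheet : List (List String)) (direction : Int) (idx : Int) : Decidable (Pre_parse_filter_line line sheet direction idx) := by unfold Pre_parse_filter_line; infer_instance

def pvWitness_parse_filter_line : String × List (List String) × Int × Int :=
  ("x ${2} y", [["u", "v"]], 0, 0)

def Spec_parse_filter_line (line : String) (sheet : List (List String)) (direction : Int) (idx : Int) (out : String) : Prop := out = parse_filter_line_alt line sheet direction idx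
instance (line : String) (sheet : List (List String)) (direction : Int) (idx : Int) (out : String) : Decidable (Spec_parse_filter_line line sheet direction idx out) := by unfold Spec_parse_filter_line; infer_instance

-- ===== CLAIM (what is proved, stated in full; the proofs are below) =====
def Claim_equal_parse_filter_line : Prop := ∀ (line : String) (sheet : List (List String)) (direction : Int) (idx : Int), Dom_parse_filter_line line sheet direction idx → Pre_parse_filter_line line sheet direction idx → Spec_parse_filter_line line sheet direction idx (parse_filter_line line sheet direction idx)

-- ===== LEMMAS AND PROOFS =====

-- ---------- find lemmas ----------

theorem find_go_ge (sub : List Char) : ∀ (s : List Char) (k : Nat),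
    PySem.Chars.find.go sub s k = -1 ∨ (k : Int) ≤ PySem.Chars.find.go sub s k
  | [], k => by
    simp only [PySem.Chars.find.go]
    split_ifs <;> simp
  | c :: t, k => by
    simp only [PySem.Chars.find.go]
    split_ifs with h
    · simp
    · rcases find_go_ge sub t (k + 1) with h' | h' <;> [left; right] <;> [exact h'; omega]

theorem find_go_eq (sub : List Char) : ∀ (s : List Char) (k : Nat),
    PySem.Chars.find.go sub s k =
      if PySem.Chars.find s sub = -1 then -1 else PySem.Chars.find s sub + k
  | [], k => by
    simp only [PySem.Chars.find, PySem.Chars.find.go]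
    split_ifs <;> simp_all
  | c :: t, k => by
    by_cases hp : sub.isPrefixOf (c :: t)
    · simp [PySem.Chars.find, PySem.Chars.find.go, hp]
    · have e1 := find_go_eq sub t (k + 1)
      have e2 := find_go_eq sub t 1
      have hge := find_go_ge sub t 0
      simp only [PySem.Chars.find] at *
      simp only [PySem.Chars.find.go, hp, if_false]
      rw [e1, e2]
      by_cases hft : PySem.Chars.find.go sub t 0 = -1
      · simp [hft]
      · rcases hge with h | h
        · exact absurd h hft
        · split_ifs <;> omega

theorem find_nonneg (s sub : List Char) :
    PySem.Chars.find s sub = -1 ∨ 0 ≤ PySem.Chars.find s sub := by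
  have := find_go_ge sub s 0
  simpa [PySem.Chars.find] using this

theorem find_of_prefix {s sub : List Char} (h : sub <+: s) (hs : s ≠ []) :
    PySem.Chars.find s sub = 0 := by
  cases s with
  | nil => exact absurd rfl hs
  | cons c t =>
    have hp : sub.isPrefixOf (c :: t) = true := List.isPrefixOf_iff_prefix.2 h
    simp [PySem.Chars.find, PySem.Chars.find.go, hp]

theorem find_cons_of_not_prefix {c : Char} {s sub : List Char} (h : ¬ sub <+: (c :: s)) :
    PySem.Chars.find (c :: s) sub =
      if PySem.Chars.find s sub = -1 then -1 else PySem.Chars.find s sub + 1 := by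
  have hp : ¬ sub.isPrefixOf (c :: s) = true := by
    simpa [List.isPrefixOf_iff_prefix] using h
  simp only [PySem.Chars.find, PySem.Chars.find.go, hp, if_false]
  exact find_go_eq sub s 1

theorem find_rbrace (cs : List Char) :
    PySem.Chars.find cs ['}'] =
      if '}' ∈ cs then ((cs.takeWhile (· ≠ '}')).length : Int) else -1 := by
  induction cs with
  | nil => simp [PySem.Chars.find, PySem.Chars.find.go]
  | cons c t ih =>
    by_cases hc : c = '}'
    · subst hc
      have h0 := find_of_prefix (show ['}'] <+: ('}' :: t) from ⟨t, rfl⟩) (by simp)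
      rw [h0]
      simp
    · have hnp : ¬ ['}'] <+: (c :: t) := by
        intro hh
        rcases List.cons_prefix_cons.1 hh with ⟨h1, _⟩
        exact hc h1.symm
      rw [find_cons_of_not_prefix hnp, ih]
      by_cases hm : '}' ∈ t
      · have hne : ((t.takeWhile (· ≠ '}')).length : Int) ≠ -1 := by omega
        have hmem : '}' ∈ c :: t := List.mem_cons_of_mem _ hm
        simp only [hm, hmem, if_true]
        rw [if_neg hne]
        simp [List.takeWhile_cons, hc]
      · have : ¬ '}' ∈ c :: t := by simp [hm, Ne.symm hc, hc]
        simp [hm, this]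

-- ---------- splitOn lemmas ----------

theorem splitOn_go_factor (sep : List Char) : ∀ (f : Nat) (l cur : List Char) (acc : List (List Char)),
    PySem.Chars.splitOn.go sep f l cur acc =
      acc.reverse ++ (PySem.Chars.splitOn.go sep f l [] []).modifyHead (cur.reverse ++ ·)
  | 0, l, cur, acc => by
    simp [PySem.Chars.splitOn.go]
  | f + 1, [], cur, acc => by
    simp [PySem.Chars.splitOn.go]
  | f + 1, c :: rest, cur, acc => by
    by_cases hp : sep.isPrefixOf (c :: rest)
    · simp only [PySem.Chars.splitOn.go, hp, if_true, List.reverse_nil]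
      rw [splitOn_go_factor sep f _ [] (cur.reverse :: acc),
          splitOn_go_factor sep f _ [] ([[]] : List (List Char))]
      simp
    · simp only [PySem.Chars.splitOn.go, hp, Bool.false_eq_true, if_false]
      rw [splitOn_go_factor sep f rest (c :: cur) acc,
          splitOn_go_factor sep f rest [c] []]
      cases hG : PySem.Chars.splitOn.go sep f rest [] [] with
      | nil => simp [List.modifyHead]
      | cons p ps => simp [List.modifyHead]

theorem splitOn_go_ne_nil (sep : List Char) : ∀ (f : Nat) (l cur : List Char) (acc : List (List Char)),
    PySem.Chars.splitOn.go sep f l cur acc ≠ []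
  | 0, l, cur, acc => by simp [PySem.Chars.splitOn.go]
  | f + 1, [], cur, acc => by simp [PySem.Chars.splitOn.go]
  | f + 1, c :: rest, cur, acc => by
    by_cases hp : sep.isPrefixOf (c :: rest)
    · simp only [PySem.Chars.splitOn.go, hp, if_true]
      exact splitOn_go_ne_nil sep f _ [] _
    · simp only [PySem.Chars.splitOn.go, hp, Bool.false_eq_true, if_false]
      exact splitOn_go_ne_nil sep f rest (c :: cur) acc

theorem splitOn_ne_nil (l sep : List Char) : PySem.Chars.splitOn l sep ≠ [] :=
  splitOn_go_ne_nil sep _ l [] []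

theorem splitOn_go_fuel (sep : List Char) (hsep : sep ≠ []) :
    ∀ (n : Nat) (l : List Char), l.length ≤ n → ∀ (f : Nat) (cur : List Char) (acc : List (List Char)),
      l.length < f →
    PySem.Chars.splitOn.go sep f l cur acc = PySem.Chars.splitOn.go sep (l.length + 1) l cur acc := by
  intro n
  induction n with
  | zero =>
    intro l hl f cur acc hf
    obtain ⟨f', rfl⟩ : ∃ f', f = f' + 1 := ⟨f - 1, by omega⟩
    cases l with
    | nil => simp [PySem.Chars.splitOn.go]
    | cons c r => simp at hl
  | succ n ih =>
    intro l hl f cur acc hf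
    obtain ⟨f', rfl⟩ : ∃ f', f = f' + 1 := ⟨f - 1, by omega⟩
    cases l with
    | nil => simp [PySem.Chars.splitOn.go]
    | cons c rest =>
      have hsl : 1 ≤ sep.length := by
        cases sep with
        | nil => exact absurd rfl hsep
        | cons a b => simp
      have hdl : (List.drop sep.length (c :: rest)).length ≤ rest.length := by
        simp only [List.length_drop, List.length_cons]
        omega
      have hrn : rest.length ≤ n := by simp only [List.length_cons] at hl; omega
      have hrf : rest.length < f' := by simp only [List.length_cons] at hf; omega
      by_cases hp : sep.isPrefixOf (c :: rest)
      · simp only [PySem.Chars.splitOn.go, hp, if_true, List.length_cons]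
        rw [ih _ (le_trans hdl hrn) f' [] _ (by omega),
            ih _ (le_trans hdl hrn) (rest.length + 1) [] _ (by omega)]
      · simp only [PySem.Chars.splitOn.go, hp, Bool.false_eq_true, if_false, List.length_cons]
        rw [ih rest hrn f' (c :: cur) acc (by omega),
            ih rest hrn (rest.length + 1) (c :: cur) acc (by omega)]

theorem splitOn_cons {c : Char} {cs p : List Char} {ps : List (List Char)} {sep : List Char}
    (h : ¬ sep <+: (c :: cs)) (hcs : PySem.Chars.splitOn cs sep = p :: ps) :
    PySem.Chars.splitOn (c :: cs) sep = (c :: p) :: ps := by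
  have hp : ¬ sep.isPrefixOf (c :: cs) = true := by
    simpa [List.isPrefixOf_iff_prefix] using h
  unfold PySem.Chars.splitOn at *
  show PySem.Chars.splitOn.go sep (cs.length + 1 + 1) (c :: cs) [] [] = _
  simp only [PySem.Chars.splitOn.go, hp, Bool.false_eq_true, if_false]
  rw [splitOn_go_factor sep (cs.length + 1) cs [c] []]
  rw [hcs]
  simp [List.modifyHead]

theorem splitOn_sep_append (sep t : List Char) (hsep : sep ≠ []) :
    PySem.Chars.splitOn (sep ++ t) sep = [] :: PySem.Chars.splitOn t sep := by
  obtain ⟨s0, sep', rfl⟩ : ∃ s0 sep', sep = s0 :: sep' := by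
    cases sep with
    | nil => exact absurd rfl hsep
    | cons a b => exact ⟨a, b, rfl⟩
  have hp : (s0 :: sep').isPrefixOf (s0 :: (sep' ++ t)) = true :=
    List.isPrefixOf_iff_prefix.2 ⟨t, by simp⟩
  unfold PySem.Chars.splitOn
  show PySem.Chars.splitOn.go (s0 :: sep') ((s0 :: (sep' ++ t)).length + 1) (s0 :: (sep' ++ t)) [] [] = _
  simp only [List.length_cons]
  show PySem.Chars.splitOn.go (s0 :: sep') ((sep' ++ t).length + 1 + 1) (s0 :: (sep' ++ t)) [] [] = _
  simp only [PySem.Chars.splitOn.go, hp, if_true, List.reverse_nil]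
  have hdrop : List.drop (s0 :: sep').length (s0 :: (sep' ++ t)) = t := by
    show List.drop (sep'.length + 1) (s0 :: (sep' ++ t)) = t
    rw [List.drop_succ_cons]
    simpa using List.drop_left (l₁ := sep') (l₂ := t)
  rw [hdrop]
  rw [splitOn_go_factor _ _ t [] [[]]]
  have hfuel : t.length < (sep' ++ t).length + 1 := by
    simp [List.length_append]
  rw [splitOn_go_fuel _ hsep t.length t le_rfl _ [] [] hfuel]
  cases hG : PySem.Chars.splitOn.go (s0 :: sep') (t.length + 1) t [] [] <;> simp

theorem splitOn_lit_append : ∀ {g : List Char} {t p : List Char} {ps : List (List Char)},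
    (∀ x ∈ g, x ≠ '$') → PySem.Chars.splitOn t ['$', '{'] = p :: ps →
    PySem.Chars.splitOn (g ++ t) ['$', '{'] = (g ++ p) :: ps := by
  intro g
  induction g with
  | nil => intro t p ps _ ht; simpa using ht
  | cons x g' ih =>
    intro t p ps hg ht
    have hx : x ≠ '$' := hg x (by simp)
    have hnp : ¬ (['$', '{'] : List Char) <+: (x :: (g' ++ t)) := by
      intro hh
      rcases List.cons_prefix_cons.1 hh with ⟨h1, _⟩
      exact hx h1.symm
    have := splitOn_cons hnp (ih (fun y hy => hg y (by simp [hy])) ht)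
    simpa using this

-- ---------- index-parser lemmas ----------

theorem psiLoop_eq : ∀ (cs : List Char) (acc : Int),
    pflA_psiLoop cs acc =
      if cs.all (fun ch => decide (65 ≤ ch.toNat) && decide (ch.toNat ≤ 90)) then
        some (cs.foldl (fun a ch => a * 26 + ((ch.toNat : Int) - 64)) acc)
      else none
  | [], acc => by simp [pflA_psiLoop]
  | ch :: t, acc => by
    have hA : ('A'.toNat : Int) = 65 := by decide
    simp only [pflA_psiLoop, hA]
    by_cases hok : 65 ≤ ch.toNat ∧ ch.toNat ≤ 90
    · have hv : ¬ ((ch.toNat : Int) - 65 + 1 < 1 ∨ (ch.toNat : Int) - 65 + 1 > 26) := by omega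
      rw [if_neg hv, psiLoop_eq t (acc * 26 + ((ch.toNat : Int) - 65 + 1))]
      have h1 : (decide (65 ≤ ch.toNat) && decide (ch.toNat ≤ 90)) = true := by
        simp [hok.1, hok.2]
      simp only [List.all_cons, h1, Bool.true_and, List.foldl_cons]
      have : acc * 26 + ((ch.toNat : Int) - 65 + 1) = acc * 26 + ((ch.toNat : Int) - 64) := by ring
      rw [this]
    · have hv : ((ch.toNat : Int) - 65 + 1 < 1 ∨ (ch.toNat : Int) - 65 + 1 > 26) := by omega
      rw [if_pos hv]
      have h1 : (decide (65 ≤ ch.toNat) && decide (ch.toNat ≤ 90)) = false := by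
        rcases (not_and_or.1 hok) with h | h <;> simp [h]
      simp [List.all_cons, h1]

theorem idxA_eq (s : List Char) : pflA_parse_sheet_index s = pvIdxVal? s := by
  unfold pflA_parse_sheet_index pvIdxVal?
  by_cases he : PySem.Chars.strip s = [] 
  · simp [he]
  · simp only [he, if_false]
    cases ho : PySem.Int.ofChars? (PySem.Chars.strip s) with
    | some n => rfl
    | none =>
      rw [psiLoop_eq]
      have hall : (PySem.Chars.upper (PySem.Chars.strip s)).all
            (fun ch => decide (65 ≤ ch.toNat) && decide (ch.toNat ≤ 90)) =
          (PySem.Chars.strip s).all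
            (fun c => decide (65 ≤ (PySem.Chars.upperChar c).toNat) &&
                      decide ((PySem.Chars.upperChar c).toNat ≤ 90)) := by
        simp [PySem.Chars.upper, List.all_map, Function.comp_def]
      rw [hall]
      by_cases hv : (PySem.Chars.strip s).all
          (fun c => decide (65 ≤ (PySem.Chars.upperChar c).toNat) &&
                    decide ((PySem.Chars.upperChar c).toNat ≤ 90)) = true
      · simp [hv]
      · simp only [Bool.not_eq_true] at hv
        simp [hv]

theorem horner_shift : ∀ (ds : List Int) (a : Int),
    ds.foldl (fun x d => x * 26 + d) a =
      a * 26 ^ ds.length + ds.foldl (fun x d => x * 26 + d) 0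
  | [], a => by simp
  | d :: ds, a => by
    simp only [List.foldl_cons, List.length_cons]
    rw [horner_shift ds (a * 26 + d), horner_shift ds (0 * 26 + d)]
    ring

theorem revfold_eq : ∀ (ds : List Int) (t m : Int),
    ds.reverse.foldl (fun tm d => (tm.1 + d * tm.2, tm.2 * 26)) (t, m) =
      (t + (ds.foldl (fun a d => a * 26 + d) 0) * m, m * 26 ^ ds.length)
  | [], t, m => by simp
  | d :: ds, t, m => by
    simp only [List.reverse_cons, List.foldl_append, List.foldl_cons, List.foldl_nil,
      List.length_cons]
    rw [revfold_eq ds t m]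
    have h1 : ds.foldl (fun a d => a * 26 + d) (0 * 26 + d) = d * 26 ^ ds.length +
        ds.foldl (fun a d => a * 26 + d) 0 := by
      rw [horner_shift ds (0 * 26 + d)]
      ring
    rw [h1, Prod.mk.injEq]
    constructor <;> ring

theorem idxB_eq (s : List Char) : pflB_index s = pvIdxVal? s := by
  unfold pflB_index pvIdxVal?
  by_cases he : PySem.Chars.strip s = []
  · simp [he]
  · simp only [he, if_false]
    cases ho : PySem.Int.ofChars? (PySem.Chars.strip s) with
    | some n => rfl
    | none =>
      by_cases hall : (PySem.Chars.strip s).all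
          (fun c => decide (65 ≤ (PySem.Chars.upperChar c).toNat) &&
                    decide ((PySem.Chars.upperChar c).toNat ≤ 90)) = true
      · have hany : ((PySem.Chars.strip s).map
            (fun c => ((PySem.Chars.upperChar c).toNat : Int) - 64)).any
              (fun d => decide (d < 1 ∨ 26 < d)) = false := by
          rw [List.any_map]
          rw [List.any_eq_false]
          intro c hc
          have := (List.all_eq_true.1 hall) c hc
          simp only [Bool.and_eq_true, decide_eq_true_eq] at this
          simp only [Function.comp_apply, decide_eq_true_eq]
          omega
        simp only [hany, Bool.false_eq_true, if_false, hall, if_true]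
        rw [revfold_eq]
        simp only [zero_add, mul_one]
        rw [List.foldl_map]
        rw [show (PySem.Chars.upper (PySem.Chars.strip s)) =
            (PySem.Chars.strip s).map PySem.Chars.upperChar from rfl]
        rw [List.foldl_map]
      · have hany : ((PySem.Chars.strip s).map
            (fun c => ((PySem.Chars.upperChar c).toNat : Int) - 64)).any
              (fun d => decide (d < 1 ∨ 26 < d)) = true := by
          rw [List.any_map, List.any_eq_true]
          simp only [Bool.not_eq_true, List.all_eq_false] at hall
          obtain ⟨c, hc, hbad⟩ := hall
          refine ⟨c, hc, ?_⟩
          simp only [Bool.and_eq_false_iff, decide_eq_false_iff_not, not_le] at hbad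
          simp only [Function.comp_apply, decide_eq_true_eq]
          omega
        simp only [Bool.not_eq_true] at hall
        simp only [hany, if_true, hall, Bool.false_eq_true, if_false]

-- ---------- cell/value lemmas ----------

-- the looked-up cell as rendered text ('' when out of range); junk [] when the lookup raises
def pvCellVal (sheet : List (List String)) (row col : Int) : List Char :=
  if row < (sheet.length : Int) then
    match PySem.List.pyGet? sheet row with
    | none => []
    | some r =>
      if col < (r.length : Int) then ((PySem.List.pyGet? r col).getD "").toList else []
  else []

-- the value one template contributes (none = a raise inside the template handling)
def pvStep (sheet : List (List String)) (direction idx : Int) (content : List Char) :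
    Option (List Char) :=
  match pvIdxVal? content with
  | none => none
  | some p =>
    match pvRC direction idx p with
    | none => none
    | some rc =>
      if pvCellOK sheet rc.1 rc.2 then some ('\'' :: pvCellVal sheet rc.1 rc.2 ++ ['\''])
      else none

theorem lookupA_eq (sheet : List (List String)) (row col : Int) :
    pflA_lookup sheet row col =
      if pvCellOK sheet row col then some ('\'' :: pvCellVal sheet row col ++ ['\'']) else none := by
  unfold pflA_lookup pvCellOK pvCellVal
  by_cases h1 : row < (sheet.length : Int)
  · simp only [h1, if_true]
    cases hg : PySem.List.pyGet? sheet row with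
    | none => simp
    | some r =>
      by_cases h2 : col < (r.length : Int)
      · simp only [h2, if_true]
        cases hc : PySem.List.pyGet? r col with
        | none => simp
        | some cell => simp
      · simp [h2]
  · simp [h1]

theorem cellB_eq (sheet : List (List String)) (row col : Int) :
    pflB_cell sheet row col =
      if pvCellOK sheet row col then some (pvCellVal sheet row col) else none := by
  unfold pflB_cell pvCellOK pvCellVal
  by_cases h1 : row < (sheet.length : Int)
  · simp only [h1, if_true]
    cases hg : PySem.List.pyGet? sheet row with
    | none => simp
    | some r =>
      by_cases h2 : col < (r.length : Int)
      · simp only [h2, if_true]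
        cases hc : PySem.List.pyGet? r col with
        | none => simp
        | some cell => simp
      · simp [h2]
  · simp [h1]

theorem templOK_eq (sheet : List (List String)) (d i : Int) (content : List Char) :
    pvTemplOK sheet d i content = (pvStep sheet d i content).isSome := by
  unfold pvTemplOK pvStep
  cases hi : pvIdxVal? content with
  | none => rfl
  | some p =>
    cases hr : pvRC d i p with
    | none => simp [hr]
    | some rc =>
      by_cases h : pvCellOK sheet rc.1 rc.2 <;> simp [hr, h]

-- A's per-template computation, factored for the unfolding lemmas below
def pflA_value? (sheet : List (List String)) (direction idx : Int) (tw : List Char) :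
    Option (List Char) :=
  match pflA_parse_sheet_index tw with
  | none => none
  | some p =>
    match (if direction = 1 then some (p, idx)
           else if direction = 0 then some (idx, p) else none) with
    | none => none
    | some rc => pflA_lookup sheet rc.1 rc.2

theorem valueA_eq (sheet : List (List String)) (d i : Int) (tw : List Char) :
    pflA_value? sheet d i tw = pvStep sheet d i tw := by
  unfold pflA_value? pvStep pvRC
  rw [idxA_eq]
  cases hi : pvIdxVal? tw with
  | none => rfl
  | some p =>
    by_cases h1 : d = 1
    · subst h1
      simp [lookupA_eq]
    · by_cases h0 : d = 0
      · subst h0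
        simp [h1, lookupA_eq]
      · simp [h1, h0]

-- ---------- unfolding pflA_loop ----------

theorem drop_length_takeWhile {α : Type} (p : α → Bool) : ∀ (l : List α),
    l.drop (l.takeWhile p).length = l.dropWhile p
  | [] => rfl
  | c :: t => by
    by_cases hp : p c
    · simp [List.takeWhile_cons, List.dropWhile_cons, hp, drop_length_takeWhile p t]
    · simp [List.takeWhile_cons, List.dropWhile_cons, hp]

theorem pflA_loop_notfound {line : List Char} (sheet : List (List String)) (d i : Int)
    (res : List Char) (hf : PySem.Chars.find line ['$', '{'] = -1) :
    pflA_loop sheet d i line res = some (res ++ line) := by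
  rw [pflA_loop, hf]
  norm_num

theorem pflA_loop_found {line : List Char} (sheet : List (List String)) (d i : Int)
    (res : List Char) (kn : Nat) (hf : PySem.Chars.find line ['$', '{'] = (kn : Int)) :
    pflA_loop sheet d i line res =
      (if '}' ∈ line.drop (kn + 2) then
         match pflA_value? sheet d i ((line.drop (kn + 2)).takeWhile (· ≠ '}')) with
         | none => none
         | some v =>
           pflA_loop sheet d i (((line.drop (kn + 2)).dropWhile (· ≠ '}')).tail)
             (res ++ line.take kn ++ v)
       else none) := by
  have h1 : ¬ ((kn : Int) < 0) := by omega
  have hs1 : PySem.List.slice line (some ((kn : Int) + 2)) none = line.drop (kn + 2) := by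
    have e1 : ((kn : Int) + 2) = ((kn + 2 : Nat) : Int) := by push_cast; ring
    rw [e1, PySem.List.slice_from_natCast]
  rw [pflA_loop, hf, dif_neg h1, hs1, find_rbrace]
  by_cases hm : '}' ∈ line.drop (kn + 2)
  · simp only [hm, if_true]
    have h2 : ¬ (((((line.drop (kn + 2)).takeWhile (· ≠ '}')).length : Nat) : Int) < 0) := by omega
    rw [dif_neg h2]
    have hcontent : PySem.List.slice line (some ((kn : Int) + 2))
        (some ((kn : Int) + 2 + (((line.drop (kn + 2)).takeWhile (· ≠ '}')).length : Int))) =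
        (line.drop (kn + 2)).takeWhile (· ≠ '}') := by
      have e1 : ((kn : Int) + 2) = ((kn + 2 : Nat) : Int) := by push_cast; ring
      have e2 : (((kn + 2 : Nat) : Int) + (((line.drop (kn + 2)).takeWhile (· ≠ '}')).length : Int)) =
          (((kn + 2) + ((line.drop (kn + 2)).takeWhile (· ≠ '}')).length : Nat) : Int) := by
        push_cast; ring
      rw [e1, e2, PySem.List.slice_natCast, Nat.add_sub_cancel_left]
      exact (List.prefix_iff_eq_take.1 (List.takeWhile_prefix _)).symm
    have hrest : PySem.List.slice line
        (some ((kn : Int) + 3 + (((line.drop (kn + 2)).takeWhile (· ≠ '}')).length : Int))) none =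
        ((line.drop (kn + 2)).dropWhile (· ≠ '}')).tail := by
      have e1 : ((kn : Int) + 3 + (((line.drop (kn + 2)).takeWhile (· ≠ '}')).length : Int)) =
          (((kn + 2) + (((line.drop (kn + 2)).takeWhile (· ≠ '}')).length + 1) : Nat) : Int) := by
        push_cast; ring
      rw [e1, PySem.List.slice_from_natCast, ← List.drop_drop]
      congr 1
      rw [← List.drop_drop, ← List.drop_one]
      congr 1
      exact drop_length_takeWhile _ _
    have hres : PySem.List.slice line none (some (kn : Int)) = line.take kn :=
      PySem.List.slice_to_natCast line kn
    rw [hcontent, hrest, hres]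
    unfold pflA_value?
    rcases hP : pflA_parse_sheet_index ((line.drop (kn + 2)).takeWhile (· ≠ '}')) with _ | p
    · simp [hP]
    · simp only [hP]
      by_cases hd1 : d = 1
      · subst hd1
        simp only [if_pos rfl]
        rcases hL : pflA_lookup sheet p i with _ | v <;> simp [hL]
      · by_cases hd0 : d = 0
        · subst hd0
          simp only [hd1, if_false, if_pos rfl]
          rcases hL : pflA_lookup sheet i p with _ | v <;> simp [hL]
        · simp [hd1, hd0]
  · simp only [hm, if_false]
    norm_num

-- ---------- the canonical rendering and the scan decomposition ----------

def pvRender (sheet : List (List String)) (direction idx : Int) :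
    List Char → Option (List Char) → List Char
  | [], _ => []
  | '$' :: '{' :: rest, none => pvRender sheet direction idx rest (some [])
  | c :: rest, none => c :: pvRender sheet direction idx rest none
  | '}' :: rest, some acc =>
    ((pvStep sheet direction idx acc).getD []) ++ pvRender sheet direction idx rest none
  | c :: rest, some acc => pvRender sheet direction idx rest (some (acc ++ [c]))

-- unfolding equations for pvScan / pvRender on a non-template head
theorem pvScan_skip (sheet : List (List String)) (d i : Int) {c : Char} {rest : List Char}
    (h : ¬ (c = '$' ∧ rest.head? = some '{')) :
    pvScan sheet d i (c :: rest) none = pvScan sheet d i rest none := by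
  rw [pvScan.eq_def]
  split <;> simp_all

theorem pvScan_inskip (sheet : List (List String)) (d i : Int) {c : Char} (rest acc : List Char)
    (hc : c ≠ '}') :
    pvScan sheet d i (c :: rest) (some acc) =
      (decide (c ≠ '$') && decide (c ≠ '{') && pvScan sheet d i rest (some (acc ++ [c]))) := by
  rw [pvScan.eq_def]
  split <;> simp_all

theorem pvRender_skip (sheet : List (List String)) (d i : Int) {c : Char} {rest : List Char}
    (h : ¬ (c = '$' ∧ rest.head? = some '{')) :
    pvRender sheet d i (c :: rest) none = c :: pvRender sheet d i rest none := by
  rw [pvRender.eq_def]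
  split <;> simp_all

theorem pvRender_inskip (sheet : List (List String)) (d i : Int) {c : Char} (rest acc : List Char)
    (hc : c ≠ '}') :
    pvRender sheet d i (c :: rest) (some acc) = pvRender sheet d i rest (some (acc ++ [c])) := by
  rw [pvRender.eq_def]
  split <;> simp_all

theorem pvScan_inside (sheet : List (List String)) (d i : Int) :
    ∀ (rest acc : List Char), pvScan sheet d i rest (some acc) = true →
      '}' ∈ rest ∧
      (∀ x ∈ rest.takeWhile (· ≠ '}'), x ≠ '$' ∧ x ≠ '{') ∧
      pvTemplOK sheet d i (acc ++ rest.takeWhile (· ≠ '}')) = true ∧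
      pvScan sheet d i ((rest.dropWhile (· ≠ '}')).tail) none = true
  | [], acc => by
    intro h
    rw [show pvScan sheet d i [] (some acc) = false from rfl] at h
    exact absurd h (by simp)
  | c :: r, acc => by
    intro h
    by_cases hc : c = '}'
    · subst hc
      rw [show pvScan sheet d i ('}' :: r) (some acc) =
          (pvTemplOK sheet d i acc && pvScan sheet d i r none) from rfl] at h
      rw [Bool.and_eq_true] at h
      refine ⟨List.mem_cons_self, ?_, ?_, ?_⟩
      · intro x hx
        simp [List.takeWhile_cons] at hx
      · simpa [List.takeWhile_cons] using h.1
      · simpa [List.dropWhile_cons] using h.2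
    · rw [pvScan_inskip sheet d i r acc hc] at h
      simp only [Bool.and_eq_true, decide_eq_true_eq] at h
      obtain ⟨⟨hcd, hcb⟩, hrec⟩ := h
      obtain ⟨hm, hch, hok, hr⟩ := pvScan_inside sheet d i r (acc ++ [c]) hrec
      have htwc : ((c :: r).takeWhile (· ≠ '}')) = c :: r.takeWhile (· ≠ '}') := by
        simp [List.takeWhile_cons, hc]
      have hdwc : ((c :: r).dropWhile (· ≠ '}')) = r.dropWhile (· ≠ '}') := by
        simp [List.dropWhile_cons, hc]
      refine ⟨List.mem_cons_of_mem _ hm, ?_, ?_, ?_⟩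
      · intro x hx
        rw [htwc] at hx
        rcases List.mem_cons.1 hx with rfl | hx'
        · exact ⟨hcd, hcb⟩
        · exact hch x hx'
      · rw [htwc,
          show acc ++ c :: r.takeWhile (· ≠ '}') = (acc ++ [c]) ++ r.takeWhile (· ≠ '}') by simp]
        exact hok
      · rw [hdwc]
        exact hr

theorem pvRender_inside (sheet : List (List String)) (d i : Int) :
    ∀ (rest acc : List Char), '}' ∈ rest →
      pvRender sheet d i rest (some acc) =
        ((pvStep sheet d i (acc ++ rest.takeWhile (· ≠ '}'))).getD []) ++
          pvRender sheet d i ((rest.dropWhile (· ≠ '}')).tail) none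
  | [], acc => by intro h; simp at h
  | c :: r, acc => by
    intro h
    by_cases hc : c = '}'
    · subst hc
      rw [show pvRender sheet d i ('}' :: r) (some acc) =
          ((pvStep sheet d i acc).getD []) ++ pvRender sheet d i r none from rfl]
      simp [List.takeWhile_cons, List.dropWhile_cons]
    · rw [pvRender_inskip sheet d i r acc hc]
      have hm : '}' ∈ r := by
        rcases List.mem_cons.1 h with h' | h'
        · exact absurd h'.symm hc
        · exact h'
      rw [pvRender_inside sheet d i r (acc ++ [c]) hm]
      have htwc : ((c :: r).takeWhile (· ≠ '}')) = c :: r.takeWhile (· ≠ '}') := by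
        simp [List.takeWhile_cons, hc]
      have hdwc : ((c :: r).dropWhile (· ≠ '}')) = r.dropWhile (· ≠ '}') := by
        simp [List.dropWhile_cons, hc]
      rw [htwc, hdwc,
        show acc ++ c :: r.takeWhile (· ≠ '}') = (acc ++ [c]) ++ r.takeWhile (· ≠ '}') by simp]

-- A's loop steps over one non-template character
theorem pflA_loop_skip (sheet : List (List String)) (d i : Int) {c : Char} {rest : List Char}
    (h : ¬ (['$', '{'] : List Char) <+: (c :: rest)) (res : List Char) :
    pflA_loop sheet d i (c :: rest) res = pflA_loop sheet d i rest (res ++ [c]) := by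
  rcases find_nonneg rest ['$', '{'] with hf | hf
  · have hfc : PySem.Chars.find (c :: rest) ['$', '{'] = -1 := by
      rw [find_cons_of_not_prefix h, hf]
      simp
    rw [pflA_loop_notfound sheet d i res hfc, pflA_loop_notfound sheet d i (res ++ [c]) hf]
    simp
  · obtain ⟨kn, hkn⟩ : ∃ kn : Nat, PySem.Chars.find rest ['$', '{'] = (kn : Int) :=
      ⟨(PySem.Chars.find rest ['$', '{']).toNat, by omega⟩
    have hne : PySem.Chars.find rest ['$', '{'] ≠ -1 := by omega
    have hfc : PySem.Chars.find (c :: rest) ['$', '{'] = ((kn + 1 : Nat) : Int) := by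
      rw [find_cons_of_not_prefix h, if_neg hne, hkn]
      push_cast
      ring
    rw [pflA_loop_found sheet d i res (kn + 1) hfc, pflA_loop_found sheet d i (res ++ [c]) kn hkn]
    have hd : List.drop (kn + 1 + 2) (c :: rest) = List.drop (kn + 2) rest := by
      rw [show kn + 1 + 2 = (kn + 2) + 1 from by omega, List.drop_succ_cons]
    rw [hd, List.take_succ_cons]
    have hres : res ++ c :: List.take kn rest = (res ++ [c]) ++ List.take kn rest := by simp
    rw [hres]

-- ---------- the two main theorems ----------

theorem thmA (sheet : List (List String)) (d i : Int) :
    ∀ (cs : List Char), pvScan sheet d i cs none = true →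
      ∀ (res : List Char), pflA_loop sheet d i cs res = some (res ++ pvRender sheet d i cs none) := by
  suffices H : ∀ (n : Nat) (cs : List Char), cs.length ≤ n → pvScan sheet d i cs none = true →
      ∀ (res : List Char), pflA_loop sheet d i cs res = some (res ++ pvRender sheet d i cs none) by
    intro cs h res
    exact H cs.length cs le_rfl h res
  intro n
  induction n with
  | zero =>
    intro cs hl _ res
    have : cs = [] := List.length_eq_zero_iff.1 (by omega)
    subst this
    rw [pflA_loop_notfound sheet d i res rfl]
    simp [pvRender]
  | succ n ih =>
    intro cs hl hscan res
    cases cs with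
    | nil =>
      rw [pflA_loop_notfound sheet d i res rfl]
      simp [pvRender]
    | cons c rest =>
      by_cases hT : c = '$' ∧ rest.head? = some '{'
      · obtain ⟨hc, hh⟩ := hT
        subst hc
        obtain ⟨r2, rest', rfl⟩ : ∃ r2 rest', rest = r2 :: rest' := by
          cases rest with
          | nil => simp at hh
          | cons a b => exact ⟨a, b, rfl⟩
        have hr2 : r2 = '{' := by simpa using hh
        subst hr2
        have hscan' : pvScan sheet d i rest' (some []) = true := hscan
        obtain ⟨hmem, hchars, hok, hrec⟩ := pvScan_inside sheet d i rest' [] hscan'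
        have hfind : PySem.Chars.find ('$' :: '{' :: rest') ['$', '{'] = ((0 : Nat) : Int) :=
          find_of_prefix ⟨rest', rfl⟩ (by simp)
        rw [pflA_loop_found sheet d i res 0 hfind]
        have hdrop : List.drop (0 + 2) ('$' :: '{' :: rest') = rest' := rfl
        rw [hdrop, if_pos hmem, valueA_eq]
        rw [List.nil_append] at hok
        rw [templOK_eq] at hok
        obtain ⟨v, hv⟩ := Option.isSome_iff_exists.1 hok
        have hlen : ((rest'.dropWhile (· ≠ '}')).tail).length ≤ n := by
          have h1 := List.length_dropWhile_le (p := (· ≠ '}')) (l := rest')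
          have h2 : ((rest'.dropWhile (· ≠ '}')).tail).length ≤
              (rest'.dropWhile (· ≠ '}')).length := by
            rw [List.length_tail]
            omega
          simp only [List.length_cons] at hl
          omega
        have hrender : pvRender sheet d i ('$' :: '{' :: rest') none =
            v ++ pvRender sheet d i ((rest'.dropWhile (· ≠ '}')).tail) none := by
          rw [show pvRender sheet d i ('$' :: '{' :: rest') none =
              pvRender sheet d i rest' (some []) from rfl]
          rw [pvRender_inside sheet d i rest' [] hmem]
          rw [List.nil_append, hv]
          rfl
        rw [hv, hrender]
        show pflA_loop sheet d i ((rest'.dropWhile (· ≠ '}')).tail) (res ++ [] ++ v) =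
          some (res ++ (v ++ pvRender sheet d i ((rest'.dropWhile (· ≠ '}')).tail) none))
        rw [ih _ hlen hrec]
        simp
      · have hnp : ¬ (['$', '{'] : List Char) <+: (c :: rest) := by
          intro hh
          rcases List.cons_prefix_cons.1 hh with ⟨h1, h2⟩
          apply hT
          refine ⟨h1.symm, ?_⟩
          cases rest with
          | nil => simp at h2
          | cons a b =>
            rcases List.cons_prefix_cons.1 h2 with ⟨h3, _⟩
            simp [← h3]
        rw [pflA_loop_skip sheet d i hnp res]
        have hscan' : pvScan sheet d i rest none = true := by
          rw [← pvScan_skip sheet d i hT]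
          exact hscan
        have hlen : rest.length ≤ n := by
          simp only [List.length_cons] at hl
          omega
        rw [ih rest hlen hscan' (res ++ [c])]
        rw [pvRender_skip sheet d i hT]
        simp

-- B's fold with a longer initial accumulator
theorem foldB_factor (sheet : List (List String)) (d i : Int) (x : List Char) :
    ∀ (parts : List (List Char)) (o : Option (List Char)),
      parts.foldl (pflB_fold sheet d i) (o.map (x ++ ·)) =
        (parts.foldl (pflB_fold sheet d i) o).map (x ++ ·)
  | [], o => rfl
  | part :: parts, o => by
    simp only [List.foldl_cons]
    have hstep : pflB_fold sheet d i (o.map (x ++ ·)) part =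
        (pflB_fold sheet d i o part).map (x ++ ·) := by
      unfold pflB_fold
      cases o with
      | none => rfl
      | some a =>
        cases pflB_part sheet d i part with
        | none => rfl
        | some piece => simp
    rw [hstep]
    exact foldB_factor sheet d i x parts _

theorem pflB_core_eq (sheet : List (List String)) (d i : Int) {cs p : List Char}
    {ps : List (List Char)} (hsp : PySem.Chars.splitOn cs ['$', '{'] = p :: ps) :
    pflB_core sheet d i cs = ps.foldl (pflB_fold sheet d i) (some p) := by
  unfold pflB_core
  rw [hsp]

theorem dropWhile_head_not {α : Type} (p : α → Bool) : ∀ (l : List α) (a : α) (t : List α),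
    l.dropWhile p = a :: t → p a = false
  | [], a, t => by simp
  | b :: l, a, t => by
    by_cases hb : p b
    · rw [List.dropWhile_cons, if_pos hb]
      exact dropWhile_head_not p l a t
    · rw [List.dropWhile_cons, if_neg hb]
      intro h
      injection h with h1 _
      rw [← h1]
      simpa using hb

theorem takeWhile_append_stop {α : Type} (p : α → Bool) (a : α) (ha : p a = false) :
    ∀ (tw r : List α), (∀ x ∈ tw, p x = true) →
      (tw ++ a :: r).takeWhile p = tw ∧ (tw ++ a :: r).dropWhile p = a :: r
  | [], r, _ => by simp [List.takeWhile_cons, List.dropWhile_cons, ha]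
  | b :: tw, r, h => by
    have hb : p b = true := h b (by simp)
    have ih := takeWhile_append_stop p a ha tw r (fun x hx => h x (by simp [hx]))
    simp only [List.cons_append, List.takeWhile_cons, List.dropWhile_cons, hb, if_true]
    exact ⟨by rw [ih.1], by rw [ih.2]⟩

-- B's per-part computation on a decomposed part
theorem partB_eq (sheet : List (List String)) (d i : Int) (tw r : List Char)
    (htw : ∀ x ∈ tw, x ≠ '}') :
    pflB_part sheet d i (tw ++ '}' :: r) = (pvStep sheet d i tw).map (· ++ r) := by
  have htw' : ∀ x ∈ tw, (fun x => decide (x ≠ '}')) x = true := by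
    intro x hx
    simp [htw x hx]
  obtain ⟨htake, hdrop⟩ := takeWhile_append_stop (fun x => decide (x ≠ '}')) '}' (by simp) tw r htw'
  have hmem : '}' ∈ tw ++ '}' :: r := by simp
  unfold pflB_part
  rw [find_rbrace]
  simp only [hmem, if_true, htake]
  have h2 : ¬ ((tw.length : Int) < 0) := by omega
  rw [if_neg h2]
  have hslice1 : PySem.List.slice (tw ++ '}' :: r) none (some (tw.length : Int)) = tw := by
    rw [PySem.List.slice_to_natCast]
    exact List.take_left
  have hslice2 : PySem.List.slice (tw ++ '}' :: r) (some ((tw.length : Int) + 1)) none = r := by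
    have e1 : ((tw.length : Int) + 1) = ((tw.length + 1 : Nat) : Int) := by push_cast; ring
    rw [e1, PySem.List.slice_from_natCast]
    rw [show tw ++ '}' :: r = (tw ++ ['}']) ++ r by simp]
    rw [show tw.length + 1 = (tw ++ ['}']).length by simp]
    exact List.drop_left
  rw [hslice1, hslice2, idxB_eq]
  unfold pvStep pvRC
  rcases hP : pvIdxVal? tw with _ | p
  · rfl
  · by_cases hd1 : d = 1
    · subst hd1
      have hif : ∀ q : Int, (if (1 : Int) = 1 then some (q, i) else if (1 : Int) = 0 then
          some (i, q) else none) = some (q, i) := fun q => by simp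
      simp only [hif]
      by_cases hok : pvCellOK sheet p i <;> simp [cellB_eq, hok]
    · by_cases hd0 : d = 0
      · subst hd0
        have hif : ∀ q : Int, (if (0 : Int) = 1 then some (q, i) else if (0 : Int) = 0 then
            some (i, q) else none) = some (i, q) := fun q => by simp
        simp only [hif]
        by_cases hok : pvCellOK sheet i p <;> simp [cellB_eq, hok]
      · simp [hd1, hd0]

theorem thmB (sheet : List (List String)) (d i : Int) :
    ∀ (cs : List Char), pvScan sheet d i cs none = true →
      pflB_core sheet d i cs = some (pvRender sheet d i cs none) := by
  suffices H : ∀ (n : Nat) (cs : List Char), cs.length ≤ n → pvScan sheet d i cs none = true →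
      pflB_core sheet d i cs = some (pvRender sheet d i cs none) by
    intro cs h
    exact H cs.length cs le_rfl h
  intro n
  induction n with
  | zero =>
    intro cs hl _
    have : cs = [] := List.length_eq_zero_iff.1 (by omega)
    subst this
    rfl
  | succ n ih =>
    intro cs hl hscan
    cases cs with
    | nil => rfl
    | cons c rest =>
      by_cases hT : c = '$' ∧ rest.head? = some '{'
      · obtain ⟨hc, hh⟩ := hT
        subst hc
        obtain ⟨r2, rest', rfl⟩ : ∃ r2 rest', rest = r2 :: rest' := by
          cases rest with
          | nil => simp at hh
          | cons a b => exact ⟨a, b, rfl⟩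
        have hr2 : r2 = '{' := by simpa using hh
        subst hr2
        have hscan' : pvScan sheet d i rest' (some []) = true := hscan
        obtain ⟨hmem, hchars, hok, hrec⟩ := pvScan_inside sheet d i rest' [] hscan'
        rw [List.nil_append] at hok
        -- decompose rest'
        have hdw : rest'.dropWhile (· ≠ '}') = '}' :: (rest'.dropWhile (· ≠ '}')).tail := by
          have hne : rest'.dropWhile (· ≠ '}') ≠ [] := by
            intro hnil
            rw [List.dropWhile_eq_nil_iff] at hnil
            have := hnil '}' hmem
            simp at this
          obtain ⟨a, t, hx⟩ : ∃ a t, rest'.dropWhile (· ≠ '}') = a :: t := by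
            cases hx : rest'.dropWhile (· ≠ '}') with
            | nil => exact absurd hx hne
            | cons a t => exact ⟨a, t, rfl⟩
          have hpa : (fun x => decide (x ≠ '}')) a = false :=
            dropWhile_head_not _ rest' a t hx
          have ha : a = '}' := by simpa using hpa
          rw [hx, ha]
          simp
        have hdecomp : rest' = rest'.takeWhile (· ≠ '}') ++ '}' :: (rest'.dropWhile (· ≠ '}')).tail := by
          conv_lhs => rw [← List.takeWhile_append_dropWhile (p := (· ≠ '}')) (l := rest')]
          rw [← hdw]
        -- split the whole line
        have hsp0 : PySem.Chars.splitOn ('$' :: '{' :: rest') ['$', '{'] =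
            [] :: PySem.Chars.splitOn rest' ['$', '{'] := by
          rw [show ('$' :: '{' :: rest') = (['$', '{'] : List Char) ++ rest' from rfl]
          exact splitOn_sep_append ['$', '{'] rest' (by simp)
        obtain ⟨p0', ps', hsp'⟩ : ∃ p0' ps',
            PySem.Chars.splitOn ((rest'.dropWhile (· ≠ '}')).tail) ['$', '{'] = p0' :: ps' := by
          cases hx : PySem.Chars.splitOn ((rest'.dropWhile (· ≠ '}')).tail) ['$', '{'] with
          | nil => exact absurd hx (splitOn_ne_nil _ _)
          | cons a b => exact ⟨a, b, rfl⟩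
        have hg : ∀ x ∈ rest'.takeWhile (· ≠ '}') ++ ['}'], x ≠ '$' := by
          intro x hx
          rcases List.mem_append.1 hx with hx' | hx'
          · exact (hchars x hx').1
          · simp only [List.mem_singleton] at hx'
            subst hx'
            decide
        have hsp1 : PySem.Chars.splitOn rest' ['$', '{'] =
            ((rest'.takeWhile (· ≠ '}') ++ ['}']) ++ p0') :: ps' := by
          conv_lhs => rw [hdecomp]
          rw [show rest'.takeWhile (· ≠ '}') ++ '}' :: (rest'.dropWhile (· ≠ '}')).tail =
              (rest'.takeWhile (· ≠ '}') ++ ['}']) ++ (rest'.dropWhile (· ≠ '}')).tail by simp]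
          exact splitOn_lit_append hg hsp'
        -- compute the first part's piece
        have hok' : (pvStep sheet d i (rest'.takeWhile (· ≠ '}'))).isSome := by
          rw [← templOK_eq]
          exact hok
        obtain ⟨v, hv⟩ := Option.isSome_iff_exists.1 hok'
        have hpart : pflB_part sheet d i ((rest'.takeWhile (· ≠ '}') ++ ['}']) ++ p0') =
            some (v ++ p0') := by
          rw [show (rest'.takeWhile (· ≠ '}') ++ ['}']) ++ p0' =
              rest'.takeWhile (· ≠ '}') ++ '}' :: p0' by simp]
          rw [partB_eq sheet d i _ p0' (fun x hx => by
            have := List.takeWhile_prefix (p := (· ≠ '}')) (l := rest')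
            have hx' := this.subset hx
            have hmem2 := List.mem_takeWhile_imp hx
            simpa using hmem2)]
          rw [hv]
          rfl
        -- B's length bound for the recursive call
        have hlen : ((rest'.dropWhile (· ≠ '}')).tail).length ≤ n := by
          have h1 := List.length_dropWhile_le (p := (· ≠ '}')) (l := rest')
          have h2 : ((rest'.dropWhile (· ≠ '}')).tail).length ≤
              (rest'.dropWhile (· ≠ '}')).length := by
            rw [List.length_tail]; omega
          simp only [List.length_cons] at hl
          omega
        have hihB := ih _ hlen hrec
        rw [pflB_core_eq sheet d i (by rw [hsp0, hsp1])]
        rw [List.foldl_cons]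
        have hfold1 : pflB_fold sheet d i (some [])
            ((rest'.takeWhile (· ≠ '}') ++ ['}']) ++ p0') = some ([] ++ (v ++ p0')) := by
          unfold pflB_fold
          rw [hpart]
        rw [hfold1]
        rw [show (some ([] ++ (v ++ p0')) : Option (List Char)) = (some p0').map (v ++ ·) by simp]
        rw [foldB_factor sheet d i v ps' (some p0')]
        rw [← pflB_core_eq sheet d i hsp', hihB]
        have hrender : pvRender sheet d i ('$' :: '{' :: rest') none =
            v ++ pvRender sheet d i ((rest'.dropWhile (· ≠ '}')).tail) none := by
          rw [show pvRender sheet d i ('$' :: '{' :: rest') none =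
              pvRender sheet d i rest' (some []) from rfl]
          rw [pvRender_inside sheet d i rest' [] hmem]
          rw [List.nil_append, hv]
          rfl
        rw [hrender]
        rfl
      · have hnp : ¬ (['$', '{'] : List Char) <+: (c :: rest) := by
          intro hh
          rcases List.cons_prefix_cons.1 hh with ⟨h1, h2⟩
          apply hT
          refine ⟨h1.symm, ?_⟩
          cases rest with
          | nil => simp at h2
          | cons a b =>
            rcases List.cons_prefix_cons.1 h2 with ⟨h3, _⟩
            simp [← h3]
        obtain ⟨p, ps, hsp⟩ : ∃ p ps, PySem.Chars.splitOn rest ['$', '{'] = p :: ps := by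
          cases hx : PySem.Chars.splitOn rest ['$', '{'] with
          | nil => exact absurd hx (splitOn_ne_nil _ _)
          | cons a b => exact ⟨a, b, rfl⟩
        have hscan' : pvScan sheet d i rest none = true := by
          rw [← pvScan_skip sheet d i hT]
          exact hscan
        have hlen : rest.length ≤ n := by
          simp only [List.length_cons] at hl
          omega
        have hihB := ih rest hlen hscan'
        rw [pflB_core_eq sheet d i (splitOn_cons hnp hsp)]
        rw [show (some (c :: p) : Option (List Char)) = (some p).map ([c] ++ ·) by simp]
        rw [foldB_factor sheet d i [c] ps (some p)]
        rw [← pflB_core_eq sheet d i hsp, hihB]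
        rw [pvRender_skip sheet d i hT]
        rfl

-- ===== VERDICT (by name: the statement is the Claim_ definition above) =====
theorem parse_filter_line_spec : Claim_equal_parse_filter_line := by
  intro line sheet direction idx _hdom hpre
  unfold Spec_parse_filter_line parse_filter_line parse_filter_line_alt
  rw [thmA sheet direction idx line.toList hpre [], thmB sheet direction idx line.toList hpre]
  simp
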